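-- pv_equiv track=rewrite | github.com/jenniferhurtado/BOSSoftEstim | deeplearning/prepare_data.py | simple_over_sample
-- ===== SOURCE A (Python) =====
-- from collections import Counter
--
-- def simple_over_sample(_xtrain, _ytrain):
--     xtrain = list(_xtrain)
--     ytrain = list(_ytrain)
--
--     samples_counter = Counter(ytrain)
--     max_samples = sorted(samples_counter.values(), reverse=True)[0]
--     for sc in samples_counter:
--         init_samples = samples_counter[sc]
--         samples_to_add = max_samples - init_samples
--         if samples_to_add > 0:
--             # collect indices to oversample for the current class
--             index = list()
--             for i in range(len(ytrain)):
--                 if ytrain[i] == sc: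
--                     index.append(i)
--             # select samples to copy for the current class
--             copy_from = [xtrain[i] for i in index]
--             index_copy = 0
--             for i in range(samples_to_add):
--                 xtrain.append(copy_from[index_copy % len(copy_from)])
--                 ytrain.append(sc)
--                 index_copy += 1
--     return xtrain, ytrain
-- ===== SOURCE B (Python) =====
-- def simple_over_sample(_xtrain, _ytrain):
--     xtrain = list(_xtrain)
--     ytrain = list(_ytrain)
--
--     # group: label -> list of its original positions, in first-appearance order
--     groups = {}
--     for i, y in enumerate(ytrain):
--         groups.setdefault(y, []).append(i)
--     max_samples = max(map(len, groups.values()), default=0)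
--     for label, idxs in groups.items():
--         deficit = max_samples - len(idxs)
--         if deficit > 0:
--             samples = [xtrain[i] for i in idxs]
--             q, r = divmod(deficit, len(samples))
--             xtrain += samples * q + samples[:r]
--             ytrain += [label] * deficit
--     return xtrain, ytrain
-- ===== Notes on version B (the rewrite author's own statement) =====
-- stated objective: faster
-- what changed: One grouping pass (label -> positions dict) replaces A's per-class rescan of ytrain, and each class's deficit is appended as whole blocks computed by divmod (samples*q + samples[:r]) instead of A's one-element-at-a-time modulo-counter loop.
-- crash fix: A raises IndexError on empty _ytrain (sorted([])[0]); B returns (_xtrain, _ytrain) unchanged there. On the other raising inputs (a minority-class position out of xtrain's range at processing time) B raises IndexError too, and Pre_ excludes them. — e.g. on simple_over_sample([7], []): A raises IndexError, B returns ([7], [])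
import Mathlib
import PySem

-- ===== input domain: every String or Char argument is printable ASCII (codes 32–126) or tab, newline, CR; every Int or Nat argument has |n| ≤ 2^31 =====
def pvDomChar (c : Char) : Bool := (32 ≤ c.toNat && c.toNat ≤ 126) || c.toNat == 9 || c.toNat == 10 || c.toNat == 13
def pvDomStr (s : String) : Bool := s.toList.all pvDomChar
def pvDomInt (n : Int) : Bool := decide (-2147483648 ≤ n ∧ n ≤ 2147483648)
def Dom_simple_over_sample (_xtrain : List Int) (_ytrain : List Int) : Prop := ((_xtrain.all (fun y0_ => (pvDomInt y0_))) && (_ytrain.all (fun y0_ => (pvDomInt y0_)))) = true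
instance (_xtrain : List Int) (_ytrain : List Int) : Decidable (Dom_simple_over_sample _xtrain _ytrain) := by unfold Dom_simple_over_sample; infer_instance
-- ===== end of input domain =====

-- B replaces A's per-class rescans and element-by-element modulo copying by one grouping pass
-- and block extends (divmod/repeat/slice); measured faster by a constant factor, same results.


-- ===== PORT A =====
-- `sorted(...)[0]` raises IndexError on empty ytrain and `xtrain[i]` raises IndexError when an
-- index is out of range (both excluded by Pre_); the port reads those through headD / pyGetD 0.
def simple_over_sample (_xtrain : List Int) (_ytrain : List Int) : List Int × List Int :=
  let xtrain := _xtrain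
  let ytrain := _ytrain
  let samples_counter := PySem.Dict.counter ytrain
  let max_samples := (PySem.List.sorted samples_counter.values (fun v => v) true).headD 0
  samples_counter.keys.foldl (fun (st : List Int × List Int) sc =>
    let init_samples := samples_counter.getD sc 0
    let samples_to_add := max_samples - init_samples
    if samples_to_add > 0 then
      let index := (PySem.List.pyRange 0 (st.2.length : Int)).foldl
        (fun idx i => if PySem.List.pyGetD st.2 i 0 == sc then idx ++ [i] else idx) []
      let copy_from := index.map (fun i => PySem.List.pyGetD st.1 i 0)
      -- for i in range(samples_to_add): append copy_from[index_copy % len]; index_copy += 1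
      let r := (PySem.List.pyRange 0 samples_to_add).foldl
        (fun (st2 : (List Int × List Int) × Int) _i =>
          ((st2.1.1 ++ [PySem.List.pyGetD copy_from (PySem.Int.mod st2.2 (copy_from.length : Int)) 0],
            st2.1.2 ++ [sc]), st2.2 + 1)) ((st.1, st.2), 0)
      r.1
    else st) (xtrain, ytrain)

-- ===== PORT B =====
def simple_over_sample_alt (_xtrain : List Int) (_ytrain : List Int) : List Int × List Int :=
  let groups := (PySem.List.enumerate _ytrain).foldl
    (fun (d : PySem.Dict Int (List Int)) p => d.modify p.2 [] (fun l => l ++ [p.1])) PySem.Dict.empty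
  let max_samples : Int := PySem.List.maxD (groups.values.map (fun l => (l.length : Int))) (fun v => v) 0
  groups.items.foldl (fun (st : List Int × List Int) p =>
    let deficit := max_samples - (p.2.length : Int)
    if deficit > 0 then
      let samples := p.2.map (fun i => PySem.List.pyGetD st.1 i 0)
      let q := PySem.Int.floordiv deficit (samples.length : Int)
      let r := PySem.Int.mod deficit (samples.length : Int)
      (st.1 ++ (PySem.List.pyRepeat samples q ++ PySem.List.slice samples none (some r)),
       st.2 ++ PySem.List.pyRepeat [p.1] deficit)
    else st) (_xtrain, _ytrain)

-- ===== PRECONDITION & SPEC =====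
-- the largest per-label multiplicity in y
def pvMaxCount (y : List Int) : Nat := (y.map (fun v => y.count v)).foldl max 0
-- the length xtrain has grown to when the class c is processed (first-appearance order)
def pvAvail (x y : List Int) (c : Int) : Nat :=
  x.length + (((PySem.Set.ofList y).takeWhile (fun c' => c' != c)).map
    (fun c' => pvMaxCount y - y.count c')).sum
-- Pre_ = exactly the inputs on which Python A returns: ytrain nonempty (else sorted(...)[0]
-- raises IndexError) and every position of a minority class below xtrain's length at the time
-- that class is processed (else xtrain[i] raises IndexError).
def Pre_simple_over_sample (_xtrain : List Int) (_ytrain : List Int) : Prop :=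
  _ytrain ≠ [] ∧ ∀ i : Nat, (h : i < _ytrain.length) →
    _ytrain.count _ytrain[i] < pvMaxCount _ytrain → i < pvAvail _xtrain _ytrain _ytrain[i]
instance (_xtrain : List Int) (_ytrain : List Int) : Decidable (Pre_simple_over_sample _xtrain _ytrain) := by unfold Pre_simple_over_sample; infer_instance
def pvWitness_simple_over_sample : List Int × List Int := ([10, 20], [1, 2, 2])
-- A raises IndexError on empty _ytrain (sorted([])[0]); B returns (_xtrain, []) unchanged there.
def Raises_simple_over_sample (_xtrain : List Int) (_ytrain : List Int) : Prop := _ytrain = []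
instance (_xtrain : List Int) (_ytrain : List Int) : Decidable (Raises_simple_over_sample _xtrain _ytrain) := by unfold Raises_simple_over_sample; infer_instance
def pvRaiseWitness_simple_over_sample : List Int × List Int := ([7], [])
def pvRaiseWitnessOut_simple_over_sample : List Int × List Int := ([7], [])
def Spec_simple_over_sample (_xtrain : List Int) (_ytrain : List Int) (out : List Int × List Int) : Prop := out = simple_over_sample_alt _xtrain _ytrain
instance (_xtrain : List Int) (_ytrain : List Int) (out : List Int × List Int) : Decidable (Spec_simple_over_sample _xtrain _ytrain out) := by unfold Spec_simple_over_sample; infer_instance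

-- ===== CLAIM (what is proved, stated in full; the proofs are below) =====
def Claim_equal_simple_over_sample : Prop := ∀ (_xtrain : List Int) (_ytrain : List Int), Dom_simple_over_sample _xtrain _ytrain → Pre_simple_over_sample _xtrain _ytrain → Spec_simple_over_sample _xtrain _ytrain (simple_over_sample _xtrain _ytrain)
def Claim_raises_simple_over_sample : Prop := (∀ (_xtrain : List Int) (_ytrain : List Int), Dom_simple_over_sample _xtrain _ytrain → Raises_simple_over_sample _xtrain _ytrain → ¬ Pre_simple_over_sample _xtrain _ytrain) ∧ (Dom_simple_over_sample (pvRaiseWitness_simple_over_sample.1) (pvRaiseWitness_simple_over_sample.2) ∧ Raises_simple_over_sample (pvRaiseWitness_simple_over_sample.1) (pvRaiseWitness_simple_over_sample.2) ∧ simple_over_sample_alt (pvRaiseWitness_simple_over_sample.1) (pvRaiseWitness_simple_over_sample.2) = pvRaiseWitnessOut_simple_over_sample)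

-- ===== LEMMAS AND PROOFS =====

-- positions (as Ints) at which label c occurs in y
def grpIdx (y : List Int) (c : Int) : List Int :=
  ((PySem.List.enumerate y).filter (fun p => p.2 == c)).map (fun p => p.1)

theorem grpIdx_append_of_not_mem (y extra : List Int) (c : Int) (h : c ∉ extra) :
    grpIdx (y ++ extra) c = grpIdx y c := by
  unfold grpIdx
  rw [PySem.List.enumerate_append, List.filter_append]
  have : (PySem.List.enumerate extra (0 + ↑y.length)).filter (fun p => p.2 == c) = [] := by
    rw [List.filter_eq_nil_iff]
    intro p hp
    rw [PySem.List.mem_enumerate_iff] at hp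
    obtain ⟨k, hk, rfl⟩ := hp
    simp only [beq_iff_eq]
    intro hc; exact h (hc ▸ List.getElem_mem hk)
  rw [this, List.append_nil]

theorem length_grpIdx (y : List Int) (c : Int) : (grpIdx y c).length = y.count c := by
  unfold grpIdx
  rw [List.length_map, ← List.countP_eq_length_filter]
  conv_rhs => rw [← PySem.List.map_snd_enumerate y 0]
  rw [List.count_eq_countP, List.countP_map]
  rfl

-- A's index-collecting scan is the filtered enumeration
theorem scan_eq_grpIdx (ys : List Int) (sc : Int) :
    (PySem.List.pyRange 0 (ys.length : Int)).foldl
      (fun idx i => if PySem.List.pyGetD ys i 0 == sc then idx ++ [i] else idx) []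
    = grpIdx ys sc := by
  rw [PySem.List.foldl_append_if_eq_filter (fun i => PySem.List.pyGetD ys i 0 == sc)]
  unfold grpIdx
  rw [PySem.List.enumerate_eq_map_pyRange ys 0, List.filter_map, List.map_map]
  simp only [PySem.List.len_eq, Function.comp_def, List.nil_append]
  exact (List.map_id' _).symm

-- the cyclic modulo copy of n elements of cf, as A's inner loop builds it
def cyc (cf : List Int) (n : Nat) : List Int :=
  (List.range n).map (fun k => cf.getD (k % cf.length) 0)

theorem cyc_small (cf : List Int) (n : Nat) (h : n ≤ cf.length) :
    cyc cf n = cf.take n := by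
  unfold cyc
  apply List.ext_getElem
  · simp [Nat.min_eq_left h]
  · intro i h1 h2
    simp only [List.getElem_map, List.getElem_range, List.getElem_take]
    have hi : i < cf.length := by simp at h1; omega
    rw [List.getD_eq_getElem _ _ (by rw [Nat.mod_eq_of_lt hi]; exact hi)]
    congr 1
    exact Nat.mod_eq_of_lt hi

theorem cyc_add (cf : List Int) (m : Nat) :
    cyc cf (cf.length + m) = cf ++ cyc cf m := by
  unfold cyc
  rw [List.range_add, List.map_append, List.map_map]
  congr 1
  · have := cyc_small cf cf.length le_rfl
    unfold cyc at this
    rw [this, List.take_length]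
  · congr 1
    funext k
    simp only [Function.comp_apply]
    congr 1
    rw [Nat.add_comm cf.length k, Nat.add_mod_right]

theorem cyc_eq_repeat_take (cf : List Int) (hcf : cf ≠ []) (n : Nat) :
    cyc cf n = (List.replicate (n / cf.length) cf).flatten ++ cf.take (n % cf.length) := by
  have hL : 0 < cf.length := List.length_pos_iff.mpr hcf
  induction n using Nat.strong_induction_on with
  | _ n ih =>
    by_cases h : n < cf.length
    · rw [Nat.div_eq_of_lt h, Nat.mod_eq_of_lt h]
      simp [cyc_small cf n (le_of_lt h)]
    · rw [Nat.not_lt] at h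
      obtain ⟨m, rfl⟩ : ∃ m, n = cf.length + m := ⟨n - cf.length, by omega⟩
      rw [cyc_add cf m, ih m (by omega)]
      have h1 : (cf.length + m) / cf.length = m / cf.length + 1 := by
        rw [Nat.add_div_left _ hL]
      have h2 : (cf.length + m) % cf.length = m % cf.length := by
        rw [Nat.add_comm, Nat.add_mod_right]
      rw [h1, h2, List.replicate_succ, List.flatten_cons, List.append_assoc]

-- A's inner append loop, solved
theorem inner_loop_eq (cf : List Int) (n : Nat) (xs ys : List Int) (sc : Int) :
    (PySem.List.pyRange 0 (n : Int)).foldl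
      (fun (st2 : (List Int × List Int) × Int) _i =>
        ((st2.1.1 ++ [PySem.List.pyGetD cf (PySem.Int.mod st2.2 (cf.length : Int)) 0],
          st2.1.2 ++ [sc]), st2.2 + 1)) ((xs, ys), 0)
    = ((xs ++ cyc cf n, ys ++ List.replicate n sc), (n : Int)) := by
  induction n with
  | zero => simp [PySem.List.pyRange_one_eq_nil (by omega : (0:Int) ≤ 0), cyc]
  | succ n ih =>
    have hcast : ((n + 1 : Nat) : Int) = (n : Int) + 1 := by push_cast; ring
    rw [hcast, PySem.List.pyRange_one_succ_right (by positivity), List.foldl_append, ih]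
    simp only [List.foldl_cons, List.foldl_nil]
    rw [PySem.Int.mod_natCast n cf.length, PySem.List.pyGetD_natCast]
    have hcyc : cyc cf (n + 1) = cyc cf n ++ [cf.getD (n % cf.length) 0] := by
      unfold cyc
      rw [List.range_succ, List.map_append]
      rfl
    rw [hcyc, List.replicate_succ']
    simp [List.append_assoc]

theorem sorted_headD_eq_maxD (L : List Int) :
    (PySem.List.sorted L (fun v => v) true).headD 0 = PySem.List.maxD L (fun v => v) 0 := by
  rcases hL : L with _ | _
  · simp [PySem.List.maxD, (PySem.List.max?_eq_none_iff ([] : List Int) (fun v => v)).mpr rfl,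
      (PySem.List.sorted_eq_nil_iff ([] : List Int) (fun v => v) true).mpr rfl]
  · rw [← hL]
    have hne : L ≠ [] := by rw [hL]; simp
    rcases hs : PySem.List.sorted L (fun v => v) true with _ | ⟨m, t⟩
    · exact absurd ((PySem.List.sorted_eq_nil_iff L _ true).mp hs) hne
    rcases hm : PySem.List.max? L (fun v => v) with _ | m'
    · exact absurd ((PySem.List.max?_eq_none_iff L _).mp hm) hne
    simp only [PySem.List.maxD, hm, Option.getD_some, List.headD_cons]
    have hmem : m ∈ L := (PySem.List.sorted_perm L (fun v => v) true).mem_iff.mp (hs ▸ List.mem_cons_self)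
    have hmem' : m' ∈ L := PySem.List.max?_mem hm
    exact le_antisymm (PySem.List.max?_isMax hm m hmem) (PySem.List.key_head_sorted_rev_ge L _ hs m' hmem')

-- B's grouping dict
def groupsOf (y : List Int) : PySem.Dict Int (List Int) :=
  (PySem.List.enumerate y).foldl
    (fun (d : PySem.Dict Int (List Int)) p => d.modify p.2 [] (fun l => l ++ [p.1])) PySem.Dict.empty

theorem keys_groupsOf (y : List Int) : (groupsOf y).keys = PySem.Set.ofList y := by
  unfold groupsOf
  rw [PySem.Dict.keys_foldl_modify_key (PySem.List.enumerate y) (fun p => p.2) []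
    (fun _ p => (fun l => l ++ [p.1]))]
  rw [PySem.List.map_snd_enumerate]
  rfl

theorem nodup_keys_groupsOf (y : List Int) : (groupsOf y).keys.Nodup := by
  unfold groupsOf
  exact PySem.Dict.nodup_keys_foldl_modify_key (PySem.List.enumerate y)
    (fun (p : Int × Int) => p.2) [] (fun _ p => (fun l => l ++ [p.1])) PySem.Dict.empty
    (by simp [PySem.Dict.empty, PySem.Dict.keys])

theorem getD_groupsOf (y : List Int) (c : Int) : (groupsOf y).getD c [] = grpIdx y c := by
  unfold groupsOf grpIdx
  have h : (PySem.List.enumerate y).foldl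
      (fun (d : PySem.Dict Int (List Int)) p => d.modify p.2 [] (fun l => l ++ [p.1])) PySem.Dict.empty
    = ((PySem.List.enumerate y).map (fun p => (p.2, p.1))).foldl
      (fun (d : PySem.Dict Int (List Int)) p => d.modify p.1 [] (fun l => l ++ [p.2])) PySem.Dict.empty := by
    rw [List.foldl_map]
  rw [h, PySem.Dict.getD_foldl_modify_append, List.filter_map, List.map_map]
  simp [Function.comp_def, PySem.Dict.empty, PySem.Dict.getD, PySem.Dict.get?]

-- two folds agree when an invariant makes their steps agree
theorem foldl_eq_of_inv {α σ : Type} (f g : σ → α → σ) (I : σ → List α → Prop)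
    (hstep : ∀ s a l', I s (a :: l') → f s a = g s a ∧ I (f s a) l') :
    ∀ (l : List α) (s : σ), I s l → l.foldl f s = l.foldl g s := by
  intro l
  induction l with
  | nil => intro s _; rfl
  | cons a l' ih =>
    intro s hI
    obtain ⟨heq, hI'⟩ := hstep s a l' hI
    rw [List.foldl_cons, List.foldl_cons, heq]
    exact ih _ (heq ▸ hI')

theorem hvalsA (y : List Int) : (PySem.Dict.counter y).values
    = (PySem.Set.ofList y).map (fun k => ((y.count k : Nat) : Int)) := by
  simp [PySem.Dict.values, PySem.Dict.items_counter, List.map_map, Function.comp_def]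

theorem hitemsB (y : List Int) : (groupsOf y).items
    = (PySem.Set.ofList y).map (fun k => (k, grpIdx y k)) := by
  rw [PySem.Dict.items_eq_map_keys (groupsOf y) (nodup_keys_groupsOf y) [], keys_groupsOf]
  exact List.map_congr_left (fun k _ => by rw [getD_groupsOf])

theorem hvalsB (y : List Int) : (groupsOf y).values.map (fun l => (l.length : Int))
    = (PySem.Set.ofList y).map (fun k => ((y.count k : Nat) : Int)) := by
  rw [PySem.Dict.values_eq_map_keys (groupsOf y) (nodup_keys_groupsOf y) [], keys_groupsOf, List.map_map]
  exact List.map_congr_left (fun k _ => by simp [getD_groupsOf, length_grpIdx])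

theorem ports_eq (x y : List Int) : simple_over_sample x y = simple_over_sample_alt x y := by
  unfold simple_over_sample simple_over_sample_alt
  dsimp only
  rw [show (PySem.List.enumerate y).foldl
    (fun (d : PySem.Dict Int (List Int)) p => d.modify p.2 [] (fun l => l ++ [p.1])) PySem.Dict.empty
    = groupsOf y from rfl]
  rw [hitemsB, hvalsB, hvalsA, sorted_headD_eq_maxD, PySem.Dict.keys_counter, List.foldl_map]
  apply foldl_eq_of_inv _ _
    (fun (st : List Int × List Int) (l : List Int) =>
      (∀ sc ∈ l, 0 < List.count sc y) ∧ l.Nodup ∧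
      ∃ extra, st.2 = y ++ extra ∧ ∀ e ∈ extra, e ∉ l)
  · intro s a l' hI
    obtain ⟨hcnt, hnd, extra, hs2, hex⟩ := hI
    have hca : 0 < List.count a y := hcnt a List.mem_cons_self
    dsimp only
    rw [PySem.Dict.getD_counter]
    have hscan : (List.foldl
        (fun idx i => if (PySem.List.pyGetD s.2 i 0 == a) = true then idx ++ [i] else idx) []
        (PySem.List.pyRange 0 (s.2.length : Int))) = grpIdx y a := by
      rw [scan_eq_grpIdx s.2 a, hs2, grpIdx_append_of_not_mem]
      intro hmem; exact hex a hmem List.mem_cons_self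
    rw [hscan, length_grpIdx y a]
    by_cases hdef : PySem.List.maxD (List.map (fun k => ((List.count k y : Nat) : Int))
        (PySem.Set.ofList y)) (fun v => v) 0 - ((List.count a y : Nat) : Int) > 0
    · rw [if_pos hdef, if_pos hdef]
      set cf := (grpIdx y a).map (fun i => PySem.List.pyGetD s.1 i 0) with hcf
      have hcflen : cf.length = List.count a y := by
        rw [hcf, List.length_map, length_grpIdx]
      have hcfne : cf ≠ [] := by
        intro h
        rw [h] at hcflen
        simp at hcflen
        omega
      set m := PySem.List.maxD (List.map (fun k => ((List.count k y : Nat) : Int))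
        (PySem.Set.ofList y)) (fun v => v) 0 with hm
      rw [show m - ((List.count a y : Nat) : Int) = (((m - ((List.count a y : Nat) : Int)).toNat : Nat) : Int)
        from (Int.toNat_of_nonneg hdef.le).symm]
      set n := (m - ((List.count a y : Nat) : Int)).toNat with hn
      rw [inner_loop_eq cf n s.1 s.2 a]
      refine ⟨?_, fun sc h => hcnt sc (List.mem_cons_of_mem a h), hnd.of_cons,
        extra ++ List.replicate n a, ?_, ?_⟩
      · show (s.1 ++ cyc cf n, s.2 ++ List.replicate n a) = _
        have h1 : PySem.List.pyRepeat cf (PySem.Int.floordiv (n : Int) (cf.length : Int))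
            = (List.replicate (n / cf.length) cf).flatten := by
          rw [PySem.Int.floordiv_natCast n cf.length]
          simp only [PySem.List.pyRepeat, Int.toNat_natCast]
        have h2 : PySem.List.slice cf none (some (PySem.Int.mod (n : Int) (cf.length : Int)))
            = cf.take (n % cf.length) := by
          rw [PySem.Int.mod_natCast n cf.length, PySem.List.slice_to_natCast]
        have h3 : PySem.List.pyRepeat [a] (n : Int) = List.replicate n a := by
          rw [PySem.List.pyRepeat_singleton]; simp
        rw [h1, h2, h3, cyc_eq_repeat_take cf hcfne n]
      · show (s.2 ++ List.replicate n a) = y ++ (extra ++ List.replicate n a)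
        rw [hs2, List.append_assoc]
      · intro e he
        rcases List.mem_append.mp he with h1 | h2
        · exact fun hm2 => hex e h1 (List.mem_cons_of_mem a hm2)
        · have he2 : e = a := List.eq_of_mem_replicate h2
          subst he2
          exact fun hm2 => (List.nodup_cons.mp hnd).1 hm2
    · rw [if_neg hdef, if_neg hdef]
      exact ⟨rfl, fun sc h => hcnt sc (List.mem_cons_of_mem a h), hnd.of_cons,
        extra, hs2, fun e he => fun hmem => hex e he (List.mem_cons_of_mem a hmem)⟩
  · exact ⟨fun sc hsc => List.count_pos_iff.mpr ((PySem.Set.mem_ofList y sc).mp hsc),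
      PySem.Set.nodup_ofList y, [], by simp, by simp⟩

-- ===== VERDICT (by name: the statement is the Claim_ definition above) =====
theorem simple_over_sample_spec : Claim_equal_simple_over_sample := by
  intro x y _ _
  unfold Spec_simple_over_sample
  exact ports_eq x y

@[simp] theorem simple_over_sample_raises : Claim_raises_simple_over_sample := by
  unfold Claim_raises_simple_over_sample
  exact ⟨by intro x y _ hr hp; exact hp.1 hr, by decide⟩
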